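-- pv_equiv track=rewrite | github.com/Abhilash8811/tunerip | scripts/add_hreflang_all_pages.py | get_page_type
-- ===== SOURCE A (Python) =====
-- LANGUAGES = {
--     'en': 'https://yt2mp3.lol',
--     'ar': 'https://yt2mp3.lol/ar',
--     'bn': 'https://yt2mp3.lol/bn',
--     'de': 'https://yt2mp3.lol/de',
--     'es': 'https://yt2mp3.lol/es',
--     'fil': 'https://yt2mp3.lol/fil',
--     'fr': 'https://yt2mp3.lol/fr',
--     'hi': 'https://yt2mp3.lol/hi',
--     'id': 'https://yt2mp3.lol/id',
--     'it': 'https://yt2mp3.lol/it',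
--     'ja': 'https://yt2mp3.lol/ja',
--     'ko': 'https://yt2mp3.lol/ko',
--     'pt': 'https://yt2mp3.lol/pt',
--     'ru': 'https://yt2mp3.lol/ru',
--     'th': 'https://yt2mp3.lol/th',
--     'tr': 'https://yt2mp3.lol/tr',
--     'ur': 'https://yt2mp3.lol/ur',
--     'vi': 'https://yt2mp3.lol/vi',
-- }
--
-- MULTI_LANG_PAGES = [
--     '',  # Homepage
--     'youtube-shorts-downloader',
--     'youtube-playlist-downloader',
--     'youtube-multi-downloader',
-- ]
--
-- LIMITED_LANG_PAGES = {
--     'youtube-mp3': ['en', 'es', 'hi', 'pt', 'id'],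
-- }
--
-- def get_page_type(page_path):
--     """Determine what type of page this is"""
--     if not page_path or page_path in LANGUAGES.values():
--         return 'homepage'
--
--     # Remove language prefix
--     for lang_code in LANGUAGES.keys():
--         if page_path.startswith(f'{lang_code}/'):
--             page_path = page_path[len(lang_code)+1:]
--             break
--
--     if page_path in MULTI_LANG_PAGES:
--         return 'multi_lang'
--
--     if page_path in LIMITED_LANG_PAGES:
--         return 'limited_lang'
--
--     return 'single_lang'
-- ===== SOURCE B (Python) =====
-- LANGUAGES = {
--     'en': 'https://yt2mp3.lol',
--     'ar': 'https://yt2mp3.lol/ar',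
--     'bn': 'https://yt2mp3.lol/bn',
--     'de': 'https://yt2mp3.lol/de',
--     'es': 'https://yt2mp3.lol/es',
--     'fil': 'https://yt2mp3.lol/fil',
--     'fr': 'https://yt2mp3.lol/fr',
--     'hi': 'https://yt2mp3.lol/hi',
--     'id': 'https://yt2mp3.lol/id',
--     'it': 'https://yt2mp3.lol/it',
--     'ja': 'https://yt2mp3.lol/ja',
--     'ko': 'https://yt2mp3.lol/ko',
--     'pt': 'https://yt2mp3.lol/pt',
--     'ru': 'https://yt2mp3.lol/ru',
--     'th': 'https://yt2mp3.lol/th',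
--     'tr': 'https://yt2mp3.lol/tr',
--     'ur': 'https://yt2mp3.lol/ur',
--     'vi': 'https://yt2mp3.lol/vi',
-- }
--
-- MULTI_LANG_PAGES = [
--     '',  # Homepage
--     'youtube-shorts-downloader',
--     'youtube-playlist-downloader',
--     'youtube-multi-downloader',
-- ]
--
-- LIMITED_LANG_PAGES = {
--     'youtube-mp3': ['en', 'es', 'hi', 'pt', 'id'],
-- }
--
-- # Precomputed classification table, built once at import time: every path whose
-- # type is not 'single_lang' is enumerated explicitly, both bare and under each
-- # language prefix.  At call time there is no prefix stripping or string parsing: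
-- # the answer is a single dictionary lookup with 'single_lang' as the default.
-- PAGE_TYPES = {}
-- for _page in MULTI_LANG_PAGES:
--     PAGE_TYPES[_page] = 'multi_lang'
--     for _lang in LANGUAGES:
--         PAGE_TYPES[f'{_lang}/{_page}'] = 'multi_lang'
-- for _page in LIMITED_LANG_PAGES:
--     PAGE_TYPES[_page] = 'limited_lang'
--     for _lang in LANGUAGES:
--         PAGE_TYPES[f'{_lang}/{_page}'] = 'limited_lang'
--
-- def get_page_type(page_path):
--     """Determine what type of page this is"""
--     if not page_path or page_path in LANGUAGES.values():
--         return 'homepage'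
--     return PAGE_TYPES.get(page_path, 'single_lang')
-- ===== Notes on version B (the rewrite author's own statement) =====
-- stated objective: alternative
-- what changed: Instead of stripping a language prefix at call time and testing membership in two collections, B precomputes once a closed classification table of every non-single_lang path (bare and under each of the 18 language prefixes) and answers each call with a single dict lookup defaulting to 'single_lang'.
import Mathlib
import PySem

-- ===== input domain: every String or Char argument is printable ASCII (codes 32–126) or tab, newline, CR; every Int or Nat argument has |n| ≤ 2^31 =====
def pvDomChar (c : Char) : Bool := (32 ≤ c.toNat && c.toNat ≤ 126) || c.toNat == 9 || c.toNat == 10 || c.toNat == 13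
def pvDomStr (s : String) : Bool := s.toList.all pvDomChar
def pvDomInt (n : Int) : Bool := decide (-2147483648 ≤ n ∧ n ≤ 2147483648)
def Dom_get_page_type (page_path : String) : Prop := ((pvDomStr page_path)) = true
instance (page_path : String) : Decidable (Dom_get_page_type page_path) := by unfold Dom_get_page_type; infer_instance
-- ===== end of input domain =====

-- B replaces A's per-call language-prefix stripping by a classification table built once
-- (every non-single_lang path, bare and under each language prefix) and a single lookup
-- (objective: alternative). Both functions are total; return values only, no mutation.

-- module-level constants (shared data of the module, at List Char level)
def pvLangKeys : List (List Char) :=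
  ["en".toList, "ar".toList, "bn".toList, "de".toList, "es".toList, "fil".toList,
   "fr".toList, "hi".toList, "id".toList, "it".toList, "ja".toList, "ko".toList,
   "pt".toList, "ru".toList, "th".toList, "tr".toList, "ur".toList, "vi".toList]

def pvLangValues : List (List Char) :=
  ["https://yt2mp3.lol".toList, "https://yt2mp3.lol/ar".toList, "https://yt2mp3.lol/bn".toList,
   "https://yt2mp3.lol/de".toList, "https://yt2mp3.lol/es".toList, "https://yt2mp3.lol/fil".toList,
   "https://yt2mp3.lol/fr".toList, "https://yt2mp3.lol/hi".toList, "https://yt2mp3.lol/id".toList,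
   "https://yt2mp3.lol/it".toList, "https://yt2mp3.lol/ja".toList, "https://yt2mp3.lol/ko".toList,
   "https://yt2mp3.lol/pt".toList, "https://yt2mp3.lol/ru".toList, "https://yt2mp3.lol/th".toList,
   "https://yt2mp3.lol/tr".toList, "https://yt2mp3.lol/ur".toList, "https://yt2mp3.lol/vi".toList]

def pvMultiLangPages : List (List Char) :=
  ["".toList, "youtube-shorts-downloader".toList, "youtube-playlist-downloader".toList,
   "youtube-multi-downloader".toList]

def pvLimitedLangKeys : List (List Char) := ["youtube-mp3".toList]

-- ===== PORT A =====
-- A's for-loop over LANGUAGES.keys() with break: try each key in order, strip on first hit.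
-- page_path[len(k)+1:] with a nonnegative start is exactly List.drop (k.length + 1).
def pvStripLoop : List (List Char) → List Char → List Char
  | [], s => s
  | k :: ks, s =>
    if PySem.Chars.startswith s (k ++ ['/']) then s.drop (k.length + 1)
    else pvStripLoop ks s

def get_page_type (page_path : String) : String :=
  let s := page_path.toList
  if s = [] ∨ s ∈ pvLangValues then "homepage"
  else
    let s' := pvStripLoop pvLangKeys s
    if s' ∈ pvMultiLangPages then "multi_lang"
    else if s' ∈ pvLimitedLangKeys then "limited_lang"
    else "single_lang"

-- ===== PORT B =====
-- B: PAGE_TYPES[page] = tag and PAGE_TYPES[f'{lang}/{page}'] = tag for every page of each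
-- listing, built with dict insert (overwrite) exactly as the Python module-level loops do;
-- the call is PAGE_TYPES.get(page_path, 'single_lang') after the unchanged homepage guard.
def pvAddPage (tag : String) (d : PySem.Dict (List Char) String) (p : List Char) :
    PySem.Dict (List Char) String :=
  pvLangKeys.foldl (fun d k => d.insert (k ++ '/' :: p) tag) (d.insert p tag)

def pvPageTypes : PySem.Dict (List Char) String :=
  pvLimitedLangKeys.foldl (pvAddPage "limited_lang")
    (pvMultiLangPages.foldl (pvAddPage "multi_lang") PySem.Dict.empty)

def get_page_type_alt (page_path : String) : String :=
  let s := page_path.toList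
  if s = [] ∨ s ∈ pvLangValues then "homepage"
  else pvPageTypes.getD s "single_lang"

-- ===== PRECONDITION & SPEC =====
def Spec_get_page_type (page_path : String) (out : String) : Prop := out = get_page_type_alt page_path
instance (page_path : String) (out : String) : Decidable (Spec_get_page_type page_path out) := by unfold Spec_get_page_type; infer_instance

-- ===== CLAIM (what is proved, stated in full; the proofs are below) =====
def Claim_equal_get_page_type : Prop := ∀ (page_path : String), Dom_get_page_type page_path → Spec_get_page_type page_path (get_page_type page_path)

-- ===== LEMMAS AND PROOFS =====

-- a '/'-free head followed by '/' determines the decomposition uniquely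
lemma pv_slash_decomp_inj : ∀ (k1 k2 t1 t2 : List Char), '/' ∉ k1 → '/' ∉ k2 →
    k1 ++ '/' :: t1 = k2 ++ '/' :: t2 → k1 = k2 ∧ t1 = t2 := by
  intro k1
  induction k1 with
  | nil =>
    intro k2 t1 t2 _ hk2 h
    cases k2 with
    | nil => simpa using h
    | cons c k2' =>
      simp only [List.nil_append, List.cons_append, List.cons.injEq] at h
      exact absurd (h.1 ▸ List.mem_cons_self) hk2
  | cons c k1' ih =>
    intro k2 t1 t2 hk1 hk2 h
    cases k2 with
    | nil =>
      simp only [List.cons_append, List.nil_append, List.cons.injEq] at h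
      exact absurd (h.1.symm ▸ List.mem_cons_self) hk1
    | cons c2 k2' =>
      simp only [List.cons_append, List.cons.injEq] at h
      obtain ⟨h12, h2⟩ := ih k2' t1 t2 (fun m => hk1 (List.mem_cons_of_mem _ m))
        (fun m => hk2 (List.mem_cons_of_mem _ m)) h.2
      exact ⟨by rw [h.1, h12], h2⟩

-- A's strip loop either peels a unique 'k/' decomposition (k a key) or leaves s unchanged
lemma pv_strip_cases (keys : List (List Char)) (s : List Char) :
    (∃ k ∈ keys, ∃ t, s = k ++ '/' :: t ∧ pvStripLoop keys s = t) ∨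
    ((∀ k ∈ keys, ∀ t, s ≠ k ++ '/' :: t) ∧ pvStripLoop keys s = s) := by
  induction keys with
  | nil => exact Or.inr ⟨by simp, rfl⟩
  | cons k ks ih =>
    by_cases h : PySem.Chars.startswith s (k ++ ['/']) = true
    · obtain ⟨t, ht⟩ := (PySem.Chars.startswith_iff s (k ++ ['/'])).mp h
      refine Or.inl ⟨k, List.mem_cons_self, t, ?_, ?_⟩
      · rw [← ht]; simp
      · rw [pvStripLoop, if_pos h, ← ht]
        have : k ++ ['/'] ++ t = k ++ '/' :: t := by simp
        rw [this]
        have hlen : k.length + 1 = (k ++ ['/']).length := by simp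
        rw [show k ++ '/' :: t = (k ++ ['/']) ++ t by simp, hlen, List.drop_left]
    · have hne : ∀ t, s ≠ k ++ '/' :: t := by
        intro t heq
        exact h ((PySem.Chars.startswith_iff s (k ++ ['/'])).mpr
          ⟨t, by rw [heq]; simp⟩)
      rcases ih with ⟨k', hk', t, hs, hr⟩ | ⟨hno, hr⟩
      · exact Or.inl ⟨k', List.mem_cons_of_mem _ hk', t, hs,
          by rw [pvStripLoop, if_neg h]; exact hr⟩
      · refine Or.inr ⟨?_, by rw [pvStripLoop, if_neg h]; exact hr⟩
        intro k' hk' t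
        rcases List.mem_cons.mp hk' with rfl | hk'
        · exact hne t
        · exact hno k' hk' t

-- lookup after a fold of inserts of the same tag over mapped keys
lemma pv_getD_foldl_insert (f : List Char → List Char) (ks : List (List Char)) (tag : String)
    (d : PySem.Dict (List Char) String) (s : List Char) (d0 : String) :
    (ks.foldl (fun d k => d.insert (f k) tag) d).getD s d0 =
      if s ∈ ks.map f then tag else d.getD s d0 := by
  induction ks generalizing d with
  | nil => simp
  | cons k ks ih =>
    rw [List.foldl_cons, ih]
    by_cases hm : s ∈ ks.map f
    · simp [hm]
    · rw [if_neg (by simpa using hm), PySem.Dict.getD_insert]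
      by_cases he : s = f k <;> simp [he, hm]

-- all keys a page contributes to the table
def pvKeysOf (p : List Char) : List (List Char) :=
  p :: pvLangKeys.map (fun k => k ++ '/' :: p)

lemma pv_getD_addPage (tag : String) (d : PySem.Dict (List Char) String) (p s : List Char)
    (d0 : String) :
    (pvAddPage tag d p).getD s d0 = if s ∈ pvKeysOf p then tag else d.getD s d0 := by
  rw [pvAddPage, pv_getD_foldl_insert]
  by_cases hm : s ∈ pvLangKeys.map (fun k => k ++ '/' :: p)
  · simp [pvKeysOf, hm]
  · rw [if_neg hm, PySem.Dict.getD_insert]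
    by_cases he : s = p <;> simp [pvKeysOf, he, hm]

lemma pv_getD_foldl_addPage (tag : String) (pages : List (List Char))
    (d : PySem.Dict (List Char) String) (s : List Char) (d0 : String) :
    (pages.foldl (pvAddPage tag) d).getD s d0 =
      if s ∈ pages.flatMap pvKeysOf then tag else d.getD s d0 := by
  induction pages generalizing d with
  | nil => simp
  | cons p pages ih =>
    rw [List.foldl_cons, ih, pv_getD_addPage]
    by_cases hm : s ∈ pages.flatMap pvKeysOf
    · simp [hm]
    · by_cases he : s ∈ pvKeysOf p <;> simp [he, hm]

-- membership in the keys contributed by a slash-free listing, given s = k ++ '/' :: t, k a key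
lemma pv_mem_flatMap_of_decomp (pages : List (List Char)) (hpf : ∀ p ∈ pages, '/' ∉ p)
    (k t : List Char) (hk : k ∈ pvLangKeys) :
    (k ++ '/' :: t) ∈ pages.flatMap pvKeysOf ↔ t ∈ pages := by
  have hkf : '/' ∉ k := by
    revert hk; unfold pvLangKeys; intro hk; fin_cases hk <;> decide
  constructor
  · intro h
    obtain ⟨p, hp, hkey⟩ := List.mem_flatMap.mp h
    rcases List.mem_cons.mp hkey with he | hm
    · exact absurd (he ▸ (by simp : '/' ∈ k ++ '/' :: t)) (hpf p hp)
    · obtain ⟨k', hk', he⟩ := List.mem_map.mp hm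
      have hk'f : '/' ∉ k' := by
        revert hk'; unfold pvLangKeys; intro hk'; fin_cases hk' <;> decide
      obtain ⟨-, ht⟩ := pv_slash_decomp_inj k' k p t hk'f hkf he
      exact ht ▸ hp
  · intro h
    exact List.mem_flatMap.mpr ⟨t, h, List.mem_cons_of_mem _
      (List.mem_map.mpr ⟨k, hk, rfl⟩)⟩

-- membership when s admits no 'key/' decomposition
lemma pv_mem_flatMap_of_no_decomp (pages : List (List Char)) (s : List Char)
    (hno : ∀ k ∈ pvLangKeys, ∀ t, s ≠ k ++ '/' :: t) :
    s ∈ pages.flatMap pvKeysOf ↔ s ∈ pages := by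
  constructor
  · intro h
    obtain ⟨p, hp, hkey⟩ := List.mem_flatMap.mp h
    rcases List.mem_cons.mp hkey with he | hm
    · exact he ▸ hp
    · obtain ⟨k, hk, he⟩ := List.mem_map.mp hm
      exact absurd he.symm (hno k hk p)
  · intro h
    exact List.mem_flatMap.mpr ⟨s, h, List.mem_cons_self⟩

-- the two membership tests never both hold
lemma pv_disjoint (t : List Char) (h1 : t ∈ pvMultiLangPages) : t ∉ pvLimitedLangKeys := by
  revert h1; unfold pvMultiLangPages pvLimitedLangKeys; intro h1; fin_cases h1 <;> decide

-- ===== VERDICT (by name: the statement is the Claim_ definition above) =====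
theorem get_page_type_spec : Claim_equal_get_page_type := by
  intro page_path _
  unfold Spec_get_page_type get_page_type get_page_type_alt
  simp only []
  by_cases hh : page_path.toList = [] ∨ page_path.toList ∈ pvLangValues
  · rw [if_pos hh, if_pos hh]
  · rw [if_neg hh, if_neg hh]
    set s := page_path.toList with hs
    rw [pvPageTypes, pv_getD_foldl_addPage, pv_getD_foldl_addPage, PySem.Dict.getD_empty]
    rcases pv_strip_cases pvLangKeys s with ⟨k, hk, t, hdec, hr⟩ | ⟨hno, hr⟩
    · rw [hr, hdec]
      simp only [pv_mem_flatMap_of_decomp pvLimitedLangKeys (by decide) k t hk,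
        pv_mem_flatMap_of_decomp pvMultiLangPages (by decide) k t hk]
      by_cases hm : t ∈ pvMultiLangPages
      · simp [hm, pv_disjoint t hm]
      · by_cases hl : t ∈ pvLimitedLangKeys <;> simp [hm, hl]
    · rw [hr]
      simp only [pv_mem_flatMap_of_no_decomp pvLimitedLangKeys s hno,
        pv_mem_flatMap_of_no_decomp pvMultiLangPages s hno]
      by_cases hm : s ∈ pvMultiLangPages
      · simp [hm, pv_disjoint s hm]
      · by_cases hl : s ∈ pvLimitedLangKeys <;> simp [hm, hl]
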